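-- pv_equiv track=rewrite | github.com/dfb/giftexchange | generate.py | HaveDuplicateNames
-- ===== SOURCE A (Python) =====
-- def HaveDuplicateNames(groups):
--     '''Inspects the groups to see if there are any people who share the same name. Used to
--     simplify the output in cases where there are not duplicates.'''
--     knownNames = set()
--     for groupNames in groups:
--         for name in groupNames:
--             name = name.lower().strip()
--             if name in knownNames:
--                 return True
--             knownNames.add(name)
--     return False
-- ===== SOURCE B (Python) =====
-- def HaveDuplicateNames(groups):
--     names = [name.lower().strip() for group in groups for name in group]
--     return len(names) != len(set(names))
-- ===== Notes on version B (the rewrite author's own statement) =====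
-- stated objective: simpler
-- what changed: Replaces the incremental membership-test-with-early-return over a growing set by a single flatten-and-normalize comprehension followed by a cardinality comparison len(names) != len(set(names)).
import Mathlib
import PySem

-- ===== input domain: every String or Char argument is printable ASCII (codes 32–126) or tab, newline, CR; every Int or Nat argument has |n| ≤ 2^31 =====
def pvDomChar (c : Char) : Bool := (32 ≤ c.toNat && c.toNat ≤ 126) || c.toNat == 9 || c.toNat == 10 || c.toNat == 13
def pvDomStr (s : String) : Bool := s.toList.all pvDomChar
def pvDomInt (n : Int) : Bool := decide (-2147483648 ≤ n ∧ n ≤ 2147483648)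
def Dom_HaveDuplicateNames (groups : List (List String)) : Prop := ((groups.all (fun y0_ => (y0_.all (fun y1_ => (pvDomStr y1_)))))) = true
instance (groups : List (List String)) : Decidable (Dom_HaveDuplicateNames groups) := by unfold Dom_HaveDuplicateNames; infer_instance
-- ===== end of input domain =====

-- B replaces A's early-exit membership scan by flatten-normalize then a cardinality comparison (simpler; same cost).

-- ===== PORT A =====
-- inner 'for name in groupNames' loop: none = early 'return True', some s = updated knownNames
def pvInnerA (names : List String) (known : PySem.Set String) : Option (PySem.Set String) :=
  match names with
  | [] => some known
  | n :: rest =>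
    let name := PySem.Str.strip (PySem.Str.lower n)
    if PySem.Set.contains known name then none
    else pvInnerA rest (PySem.Set.add known name)

-- outer 'for groupNames in groups' loop
def pvOuterA (groups : List (List String)) (known : PySem.Set String) : Bool :=
  match groups with
  | [] => false
  | g :: rest =>
    match pvInnerA g known with
    | none => true
    | some known' => pvOuterA rest known'

def HaveDuplicateNames (groups : List (List String)) : Bool :=
  pvOuterA groups PySem.Set.empty

-- ===== PORT B =====
def HaveDuplicateNames_alt (groups : List (List String)) : Bool :=
  let names := groups.flatMap (fun g => g.map (fun n => PySem.Str.strip (PySem.Str.lower n)))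
  decide (names.length ≠ (PySem.Set.ofList names).length)

-- ===== PRECONDITION & SPEC =====
def Spec_HaveDuplicateNames (groups : List (List String)) (out : Bool) : Prop := out = HaveDuplicateNames_alt groups
instance (groups : List (List String)) (out : Bool) : Decidable (Spec_HaveDuplicateNames groups out) := by unfold Spec_HaveDuplicateNames; infer_instance

-- ===== CLAIM (what is proved, stated in full; the proofs are below) =====
def Claim_equal_HaveDuplicateNames : Prop := ∀ (groups : List (List String)), Dom_HaveDuplicateNames groups → Spec_HaveDuplicateNames groups (HaveDuplicateNames groups)

-- ===== LEMMAS AND PROOFS =====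

-- single flattened scan, used only to relate the two ports
def pvScan (xs : List String) (known : PySem.Set String) : Bool :=
  match xs with
  | [] => false
  | x :: rest => if PySem.Set.contains known x then true else pvScan rest (PySem.Set.add known x)

theorem pvScan_inner (g : List String) (rest : List String) (s : PySem.Set String) :
    pvScan (g.map (fun n => PySem.Str.strip (PySem.Str.lower n)) ++ rest) s =
      match pvInnerA g s with
      | none => true
      | some s' => pvScan rest s' := by
  induction g generalizing s with
  | nil => simp [pvInnerA]
  | cons n tl ih =>
    simp only [List.map_cons, List.cons_append, pvScan, pvInnerA]
    by_cases h : PySem.Str.strip (PySem.Str.lower n) ∈ s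
    · simp [h]
    · simp [h, ih]

theorem pvOuter_eq_scan (groups : List (List String)) (s : PySem.Set String) :
    pvOuterA groups s =
      pvScan (groups.flatMap (fun g => g.map (fun n => PySem.Str.strip (PySem.Str.lower n)))) s := by
  induction groups generalizing s with
  | nil => simp [pvOuterA, pvScan]
  | cons g rest ih =>
    simp only [List.flatMap_cons, pvOuterA, pvScan_inner]
    cases pvInnerA g s with
    | none => rfl
    | some s' => exact ih s'

theorem update_length_le (xs : List String) (s : PySem.Set String) :
    (PySem.Set.update s xs).length ≤ s.length + xs.length := by
  induction xs generalizing s with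
  | nil => simp [PySem.Set.update]
  | cons x rest ih =>
    have h := ih (PySem.Set.add s x)
    have hadd : (PySem.Set.add s x).length ≤ s.length + 1 := by
      unfold PySem.Set.add
      split <;> simp
    calc (PySem.Set.update s (x :: rest)).length
        = (PySem.Set.update (PySem.Set.add s x) rest).length := by
          simp [PySem.Set.update, List.foldl]
      _ ≤ (PySem.Set.add s x).length + rest.length := h
      _ ≤ s.length + 1 + rest.length := by omega
      _ = s.length + (x :: rest).length := by simp; omega

theorem pvScan_card (xs : List String) (s : PySem.Set String) :
    pvScan xs s = decide ((PySem.Set.update s xs).length ≠ s.length + xs.length) := by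
  induction xs generalizing s with
  | nil => simp [pvScan, PySem.Set.update]
  | cons x rest ih =>
    simp only [pvScan]
    by_cases h : x ∈ s
    · have hadd : PySem.Set.add s x = s := by simp [PySem.Set.add, h]
      have hle := update_length_le rest s
      have hup : PySem.Set.update s (x :: rest) = PySem.Set.update s rest := by
        simp [PySem.Set.update, List.foldl, hadd]
      have hne : (PySem.Set.update s rest).length ≠ s.length + (rest.length + 1) := by omega
      simp [h, hup, hne]
    · have hadd : PySem.Set.add s x = s ++ [x] := by simp [PySem.Set.add, h]
      have hup : PySem.Set.update s (x :: rest) = PySem.Set.update (s ++ [x]) rest := by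
        simp [PySem.Set.update, List.foldl, hadd]
      simp only [ih, hup, hadd]
      simp only [List.length_append, List.length_cons, List.length_nil]
      have : PySem.Set.contains s x = false := by simp [h]
      simp only [this, Bool.false_eq_true, if_false, decide_eq_decide]
      omega

-- ===== VERDICT (by name: the statement is the Claim_ definition above) =====
theorem HaveDuplicateNames_spec : Claim_equal_HaveDuplicateNames := by
  intro groups _
  unfold Spec_HaveDuplicateNames HaveDuplicateNames HaveDuplicateNames_alt
  rw [pvOuter_eq_scan, pvScan_card]
  have hof : PySem.Set.update PySem.Set.empty
      (groups.flatMap (fun g => g.map (fun n => PySem.Str.strip (PySem.Str.lower n)))) =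
      PySem.Set.ofList (groups.flatMap (fun g => g.map (fun n => PySem.Str.strip (PySem.Str.lower n)))) := by
    simp [PySem.Set.update, PySem.Set.ofList_eq_foldl, PySem.Set.empty]
  rw [hof]
  simp only [PySem.Set.empty, List.length_nil, Nat.zero_add, decide_eq_decide]
  exact ne_comm
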